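-- pv_equiv track=rewrite | github.com/MrGmo/codeWars-Python | 7kyu/most-valuable-character.py | solve
-- ===== SOURCE A (Python) =====
-- def solve(st):
--     seen_index = {}
--     result = []
--     if len(st) == 1:
--         return st
--     if len(set(st)) == len(st):
--         return st[0]
--     for i in range(len(st)):
--         if st[i] not in seen_index:
--             seen_index[st[i]] = [i]
--         else:
--             seen_index[st[i]].append(i)
--     for key, val in seen_index.items():
--         seen_index[key] = val[-1] - val[0]
--     max_char, max_val = max(
--         [(key, val) for key, val in seen_index.items()], key=lambda x: x[1]
--     )
--     for key, val in seen_index.items():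
--         if val == max_val:
--             result.append(key)
--     return sorted(result)[0]
-- ===== SOURCE B (Python) =====
-- def solve(st):
--     # span(c) = last occurrence - first occurrence; return the smallest char
--     # among those with maximal span.  Guard: if all chars are distinct
--     # (covers len 1 too), return st[0] as the original does.
--     chars = sorted(set(st))
--     if len(chars) == len(st):
--         return st[0]
--     best_char, best_span = None, -1
--     for c in chars:
--         span = (len(st) - 1 - st[::-1].index(c)) - st.index(c)
--         if best_span < span:
--             best_char, best_span = c, span
--     return best_char
-- ===== Notes on version B (the rewrite author's own statement) =====
-- stated objective: simpler
-- what changed: A builds a dict of all occurrence-index lists, rewrites it to spans, takes max over items, collects all tying keys and sorts them to pick the smallest; B iterates once over sorted(set(st)), computes each span directly with str.index on the string and its reverse, and keeps the first strict improver, so ascending order resolves ties with no tie-collection or final sort.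
import Mathlib
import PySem

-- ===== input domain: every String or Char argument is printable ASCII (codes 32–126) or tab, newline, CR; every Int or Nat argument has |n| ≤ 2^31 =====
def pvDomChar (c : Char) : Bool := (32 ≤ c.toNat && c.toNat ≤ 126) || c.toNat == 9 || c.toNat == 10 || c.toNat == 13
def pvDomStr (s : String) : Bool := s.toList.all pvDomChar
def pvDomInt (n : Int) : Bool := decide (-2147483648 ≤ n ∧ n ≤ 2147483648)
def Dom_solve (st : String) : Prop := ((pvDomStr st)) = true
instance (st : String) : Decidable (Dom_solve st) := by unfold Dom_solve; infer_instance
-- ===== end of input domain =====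

-- B replaces A's dict-of-index-lists + tie-collection + final sort by a single pass over
-- sorted(set(st)) computing each span from str.index on the string and its reverse (simpler).

-- ===== PORT A =====
-- body of A's first loop: 'if st[i] not in seen_index: seen_index[st[i]] = [i] else: seen_index[st[i]].append(i)'
-- (st[i] with i drawn from range(len(st)) is always in range, so the pyGetD default is never reached)
def seenStep (l : List Char) (d : PySem.Dict Char (List Int)) (i : Int) : PySem.Dict Char (List Int) :=
  let c := PySem.List.pyGetD l i ' '
  if d.contains c = false then d.insert c [i]
  else d.insert c ((d.get? c).getD [] ++ [i])

def solve (st : String) : String :=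
  let l := st.toList
  if l.length = 1 then st
  else if (PySem.Set.ofList l).length = l.length then
    match PySem.List.pyGet? l 0 with
    | some c => String.ofList [c]     -- return st[0]
    | none => ""                       -- st[0] on "" raises IndexError: excluded by Pre_solve
  else
    let seen := (PySem.List.pyRange 0 (l.length : Int) 1).foldl (seenStep l) PySem.Dict.empty
    -- 'for key, val in seen_index.items(): seen_index[key] = val[-1] - val[0]' (the value type
    -- changes, so the rebound dict is built afresh; val is never empty, defaults unreachable)
    let spans := seen.items.foldl
      (fun (d : PySem.Dict Char Int) kv =>
        d.insert kv.1 (PySem.List.pyGetD kv.2 (-1) 0 - PySem.List.pyGetD kv.2 0 0))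
      PySem.Dict.empty
    match PySem.List.max? spans.items (fun kv => kv.2) with
    | none => ""                       -- max() on an empty dict raises: unreachable under Pre_solve
    | some mkv =>
      let result := spans.items.foldl
        (fun r kv => if kv.2 == mkv.2 then r ++ [kv.1] else r) ([] : List Char)
      match PySem.List.pyGet? (PySem.List.sorted result (fun c => c)) 0 with
      | some c => String.ofList [c]   -- return sorted(result)[0]
      | none => ""                     -- result is never empty here (the max is attained)

-- ===== PORT B =====
-- span = (len(st) - 1 - st[::-1].index(c)) - st.index(c); c is drawn from set(st), so both
-- .index calls always succeed and the getD defaults are never reached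
def spanAt (l : List Char) (c : Char) : Int :=
  ((l.length : Int) - 1 - ((PySem.List.index? l.reverse c).getD 0 : Nat))
    - ((PySem.List.index? l c).getD 0 : Nat)

-- loop body: 'if best_span < span: best_char, best_span = c, span'
def bestStep (l : List Char) (acc : Option Char × Int) (c : Char) : Option Char × Int :=
  let span := spanAt l c
  if acc.2 < span then (some c, span) else acc

def solve_alt (st : String) : String :=
  let l := st.toList
  let chars := PySem.List.sorted (PySem.Set.ofList l) (fun c => c)
  if chars.length = l.length then
    match PySem.List.pyGet? l 0 with
    | some c => String.ofList [c]     -- return st[0]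
    | none => ""                       -- st[0] on "" raises IndexError: excluded by Pre_solve
  else
    let best := chars.foldl (bestStep l) ((none : Option Char), (-1 : Int))
    match best.1 with
    | some c => String.ofList [c]     -- return best_char
    | none => ""                       -- unreachable: chars is nonempty here

-- ===== PRECONDITION & SPEC =====
-- Pre_ excludes only the empty string, on which A (and B) raise IndexError via st[0].
def Pre_solve (st : String) : Prop := st.toList ≠ []
instance (st : String) : Decidable (Pre_solve st) := by unfold Pre_solve; infer_instance
def pvWitness_solve : String := "aba"
def Spec_solve (st : String) (out : String) : Prop := out = solve_alt st
instance (st : String) (out : String) : Decidable (Spec_solve st out) := by unfold Spec_solve; infer_instance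

-- ===== CLAIM (what is proved, stated in full; the proofs are below) =====
def Claim_equal_solve : Prop := ∀ (st : String), Dom_solve st → Pre_solve st → Spec_solve st (solve st)

-- ===== LEMMAS AND PROOFS =====

-- the list of indices (starting at s) at which c occurs in l
def occ (l : List Char) (s : Int) (c : Char) : List Int :=
  ((PySem.List.enumerate l s).filter (fun p => p.2 == c)).map (fun p => p.1)

lemma occ_cons (x : Char) (xs : List Char) (s : Int) (c : Char) :
    occ (x :: xs) s c = (if x == c then [s] else []) ++ occ xs (s + 1) c := by
  by_cases h : x = c <;> simp [occ, PySem.List.enumerate_cons, h]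

lemma occ_eq_nil_of_not_mem {l : List Char} {c : Char} (h : c ∉ l) (s : Int) :
    occ l s c = [] := by
  induction l generalizing s with
  | nil => rfl
  | cons x xs ih =>
      have hx : x ≠ c := fun e => h (e ▸ List.mem_cons_self)
      simp [occ_cons, hx, ih (fun m => h (List.mem_cons_of_mem _ m))]

lemma occ_head? {l : List Char} {c : Char} (h : c ∈ l) (s : Int) :
    (occ l s c).head? = some (s + ((PySem.List.index? l c).getD 0 : Nat)) := by
  induction l generalizing s with
  | nil => cases h
  | cons x xs ih =>
      by_cases hx : x = c
      · subst hx
        rw [occ_cons, PySem.List.index?_cons_self]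
        simp
      · have hm : c ∈ xs := by
          rcases List.mem_cons.mp h with h' | h'
          · exact absurd h'.symm hx
          · exact h'
        obtain ⟨n, hn⟩ := Option.isSome_iff_exists.mp
          ((PySem.List.index?_isSome_iff xs c).mpr hm)
        rw [occ_cons, PySem.List.index?_cons_of_ne _ hx, hn]
        have hif : (if x == c then [s] else []) = ([] : List Int) := by simp [hx]
        rw [hif, List.nil_append, ih hm (s + 1), hn]
        simp only [Option.map_some, Option.getD_some, Option.some.injEq]
        push_cast
        ring

lemma occ_ne_nil {l : List Char} {c : Char} (h : c ∈ l) (s : Int) :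
    occ l s c ≠ [] := by
  intro he
  have := occ_head? h s
  rw [he] at this
  simp at this

lemma occ_getLast? {l : List Char} {c : Char} (h : c ∈ l) (s : Int) :
    (occ l s c).getLast? =
      some (s + (l.length : Int) - 1 - ((PySem.List.index? l.reverse c).getD 0 : Nat)) := by
  induction l generalizing s with
  | nil => cases h
  | cons x xs ih =>
      by_cases hm : c ∈ xs
      · -- last occurrence is inside xs
        have hrev : c ∈ xs.reverse := List.mem_reverse.mpr hm
        have hidx : PySem.List.index? ((x :: xs).reverse) c = PySem.List.index? xs.reverse c := by
          rw [List.reverse_cons]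
          exact PySem.List.index?_append_of_mem _ hrev
        have hxs := ih hm (s + 1)
        have hne := occ_ne_nil hm (s + 1)
        by_cases hx : x = c
        · subst hx
          obtain ⟨b, t, hbt⟩ := List.exists_cons_of_ne_nil hne
          rw [occ_cons]
          have hif : (if x == x then [s] else []) = [s] := by simp
          rw [hif, hbt, List.singleton_append, List.getLast?_cons_cons, ← hbt, hxs, hidx]
          simp only [Option.some.injEq, List.length_cons]
          push_cast
          ring
        · rw [occ_cons]
          have hif : (if x == c then [s] else []) = ([] : List Int) := by simp [hx]
          rw [hif, List.nil_append, hxs, hidx]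
          simp only [Option.some.injEq, List.length_cons]
          push_cast
          ring
      · -- c occurs only as x (so x = c) and is the last occurrence
        have hx : x = c := by
          rcases List.mem_cons.mp h with h' | h'
          · exact h'.symm
          · exact absurd h' hm
        subst hx
        have hrev : x ∉ xs.reverse := fun m => hm (List.mem_reverse.mp m)
        rw [occ_cons]
        have hif : (if x == x then [s] else []) = [s] := by simp
        rw [hif, occ_eq_nil_of_not_mem hm, List.append_nil,
          List.reverse_cons, PySem.List.index?_append_singleton_self _ _ hrev]
        simp only [List.getLast?_singleton, Option.getD_some, Option.some.injEq,
          List.length_cons, List.length_reverse]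
        push_cast
        ring

lemma pyGet?_zero {α : Type} (xs : List α) : PySem.List.pyGet? xs 0 = xs.head? := by
  cases xs <;> simp [PySem.List.pyGet?, PySem.List.pyIdx?]

lemma pyGet?_neg_one {α : Type} (xs : List α) : PySem.List.pyGet? xs (-1) = xs.getLast? := by
  cases xs with
  | nil => rfl
  | cons x t =>
      rw [List.getLast?_eq_getElem?]
      simp [PySem.List.pyGet?, PySem.List.pyIdx?]

-- A's span (computed from the occurrence list) equals B's span (computed with str.index)
lemma span_eq {l : List Char} {c : Char} (h : c ∈ l) :
    PySem.List.pyGetD (occ l 0 c) (-1) 0 - PySem.List.pyGetD (occ l 0 c) 0 0 = spanAt l c := by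
  unfold PySem.List.pyGetD spanAt
  rw [pyGet?_zero, pyGet?_neg_one, occ_head? h 0, occ_getLast? h 0]
  simp only [Option.getD_some]
  ring

lemma span_nonneg {l : List Char} {c : Char} (h : c ∈ l) : 0 ≤ spanAt l c := by
  obtain ⟨f, hf⟩ := Option.isSome_iff_exists.mp ((PySem.List.index?_isSome_iff l c).mpr h)
  have hrev : c ∈ l.reverse := List.mem_reverse.mpr h
  obtain ⟨r, hr⟩ := Option.isSome_iff_exists.mp ((PySem.List.index?_isSome_iff l.reverse c).mpr hrev)
  obtain ⟨hfl, hfe, hfmin⟩ := PySem.List.getElem_of_index?_eq_some hf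
  obtain ⟨hrl, hre, -⟩ := PySem.List.getElem_of_index?_eq_some hr
  have hrl' : r < l.length := by simpa using hrl
  -- position (l.length - 1 - r) holds c, and f is the first such position
  have hj : l[l.length - 1 - r]'(by omega) = c := by
    rw [← List.getElem_reverse hrl]; exact hre
  have hfle : f ≤ l.length - 1 - r := by
    by_contra hlt
    exact hfmin (l.length - 1 - r) (by omega) hj
  unfold spanAt
  rw [hf, hr]
  simp only [Option.getD_some]
  omega

-- running strict-max fold: no update when nothing beats the accumulator
lemma fold_no_update (l : List Char) :
    ∀ (t : List Char) (acc : Option Char × Int), (∀ c ∈ t, spanAt l c ≤ acc.2) →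
      t.foldl (bestStep l) acc = acc := by
  intro t
  induction t with
  | nil => intro acc _; rfl
  | cons x xs ih =>
      intro acc h
      have hx : spanAt l x ≤ acc.2 := h x List.mem_cons_self
      have : bestStep l acc x = acc := by
        unfold bestStep; simp only []; rw [if_neg (by omega)]
      rw [List.foldl_cons, this]
      exact ih acc (fun c hc => h c (List.mem_cons_of_mem _ hc))

lemma fold_max_of_le (l : List Char) :
    ∀ (t : List Char) (v : Int), (∀ c ∈ t, spanAt l c ≤ v) →
      t.foldl (fun m c => max m (spanAt l c)) v = v := by
  intro t
  induction t with
  | nil => intro v _; rfl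
  | cons x xs ih =>
      intro v h
      rw [List.foldl_cons, max_eq_left (h x List.mem_cons_self)]
      exact ih v (fun c hc => h c (List.mem_cons_of_mem _ hc))

-- the strict-> running best returns the FIRST element attaining the running maximum
lemma fold_best (l : List Char) :
    ∀ (xs : List Char) (a : Option Char × Int), (∃ c ∈ xs, a.2 < spanAt l c) →
      xs.foldl (bestStep l) a =
        ((xs.filter (fun c => spanAt l c == xs.foldl (fun m c => max m (spanAt l c)) a.2)).head?,
         xs.foldl (fun m c => max m (spanAt l c)) a.2) := by
  intro xs
  induction xs with
  | nil => rintro a ⟨c, hc, -⟩; cases hc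
  | cons x t ih =>
      intro a h
      by_cases h1 : a.2 < spanAt l x
      · have hstep : bestStep l a x = (some x, spanAt l x) := by
          unfold bestStep; simp only []; rw [if_pos h1]
        by_cases h2 : ∃ c ∈ t, spanAt l x < spanAt l c
        · -- something in t beats x; recurse from (some x, span x)
          obtain ⟨c0, hc0, hlt⟩ := h2
          have hxlt : spanAt l x < t.foldl (fun m c => max m (spanAt l c)) (spanAt l x) := by
            have hle := (PySem.List.le_foldl_max_int t (spanAt l) (spanAt l x)).2 c0 hc0
            omega
          have hrec := ih (some x, spanAt l x) ⟨c0, hc0, hlt⟩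
          rw [List.foldl_cons, hstep, hrec, List.foldl_cons,
            max_eq_right (le_of_lt h1)]
          congr 1
          rw [List.filter_cons]
          have hfalse :
              (spanAt l x == t.foldl (fun m c => max m (spanAt l c)) (spanAt l x)) = false := by
            simp only [beq_eq_false_iff_ne, ne_eq]
            omega
          rw [hfalse]
          simp
        · -- nothing in t beats x: the fold stays at (some x, span x)
          have h2 : ∀ c ∈ t, spanAt l c ≤ spanAt l x := by
            intro c hc
            by_contra hgt
            exact h2 ⟨c, hc, lt_of_not_ge hgt⟩
          have hconst := fold_no_update l t (some x, spanAt l x) h2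
          have hmax := fold_max_of_le l t (spanAt l x) h2
          rw [List.foldl_cons, hstep, hconst, List.foldl_cons,
            max_eq_right (le_of_lt h1), hmax]
          congr 1
          rw [List.filter_cons]
          have htrue : (spanAt l x == spanAt l x) = true := by simp
          rw [htrue]
          simp
      · -- x does not beat a; the witness is in t
        have hstep : bestStep l a x = a := by
          unfold bestStep; simp only []; rw [if_neg h1]
        obtain ⟨c0, hc0, hlt⟩ := h
        have hc0t : c0 ∈ t := by
          rcases List.mem_cons.mp hc0 with h' | h'
          · subst h'; omega
          · exact h'
        have hrec := ih a ⟨c0, hc0t, hlt⟩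
        have hle := (PySem.List.le_foldl_max_int t (spanAt l) a.2).2 c0 hc0t
        rw [List.foldl_cons, hstep, hrec, List.foldl_cons,
          max_eq_left (by omega : spanAt l x ≤ a.2)]
        congr 1
        rw [List.filter_cons]
        have hfalse :
            (spanAt l x == t.foldl (fun m c => max m (spanAt l c)) a.2) = false := by
          simp only [beq_eq_false_iff_ne, ne_eq]
          omega
        rw [hfalse]
        simp

-- characterisation of A's seen_index dict
lemma seen_eq_modify (l : List Char) :
    (PySem.List.pyRange 0 (l.length : Int) 1).foldl (seenStep l) PySem.Dict.empty
      = ((PySem.List.enumerate l).map Prod.swap).foldl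
          (fun d q => d.modify q.1 [] (· ++ [q.2])) PySem.Dict.empty := by
  rw [List.foldl_map, PySem.List.enumerate_eq_map_pyRange l ' ', List.foldl_map]
  apply PySem.List.foldl_congr_mem
  intro d i _
  unfold seenStep PySem.Dict.modify
  simp only [Prod.swap_prod_mk]
  rw [PySem.Dict.getD_eq_get?_getD, PySem.Dict.contains_eq_isSome_get?]
  cases h : (d.get? (PySem.List.pyGetD l i ' ')) <;> simp

lemma seen_getD (l : List Char) (c : Char) :
    ((PySem.List.pyRange 0 (l.length : Int) 1).foldl (seenStep l) PySem.Dict.empty).getD c []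
      = occ l 0 c := by
  rw [seen_eq_modify, PySem.Dict.getD_foldl_modify_append]
  simp only [PySem.Dict.getD_empty, List.nil_append]
  unfold occ
  rw [List.filter_map, List.map_map]
  congr 1

lemma seen_keys (l : List Char) :
    ((PySem.List.pyRange 0 (l.length : Int) 1).foldl (seenStep l) PySem.Dict.empty).keys
      = PySem.Set.ofList l := by
  rw [seen_eq_modify, List.foldl_map]
  have := PySem.Dict.keys_foldl_modify_key (PySem.List.enumerate l)
    (fun p => (Prod.swap p).1) [] (fun d p v => v ++ [(Prod.swap p).2]) PySem.Dict.empty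
  simp only [Prod.fst_swap, Prod.snd_swap] at this ⊢
  rw [this]
  have hsnd : (PySem.List.enumerate l).map (fun p => p.2) = l := PySem.List.map_snd_enumerate l 0
  rw [PySem.Dict.keys_empty, hsnd]
  rfl

lemma seen_items (l : List Char) :
    ((PySem.List.pyRange 0 (l.length : Int) 1).foldl (seenStep l) PySem.Dict.empty).items
      = (PySem.Set.ofList l).map (fun c => (c, occ l 0 c)) := by
  set d := (PySem.List.pyRange 0 (l.length : Int) 1).foldl (seenStep l) PySem.Dict.empty with hd
  have hnd : d.keys.Nodup := by
    rw [seen_keys]; exact PySem.Set.nodup_ofList l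
  rw [PySem.Dict.items_eq_map_keys d hnd []]
  rw [seen_keys]
  exact List.map_congr_left (fun c _ => by rw [seen_getD])

lemma spans_items (l : List Char) :
    (((PySem.List.pyRange 0 (l.length : Int) 1).foldl (seenStep l) PySem.Dict.empty).items.foldl
        (fun (d : PySem.Dict Char Int) kv =>
          d.insert kv.1 (PySem.List.pyGetD kv.2 (-1) 0 - PySem.List.pyGetD kv.2 0 0))
        PySem.Dict.empty).items
      = (PySem.Set.ofList l).map
          (fun c => (c, PySem.List.pyGetD (occ l 0 c) (-1) 0 - PySem.List.pyGetD (occ l 0 c) 0 0)) := by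
  rw [seen_items]
  have hfresh := PySem.Dict.items_foldl_insert_fresh
    (l := (PySem.Set.ofList l).map (fun c => (c, occ l 0 c)))
    (k := fun kv => kv.1)
    (v := fun kv => PySem.List.pyGetD kv.2 (-1) 0 - PySem.List.pyGetD kv.2 0 0)
    (d := PySem.Dict.empty)
    (fun a _ => PySem.Dict.contains_empty _)
    (by rw [List.map_map]
        exact ((PySem.Set.nodup_ofList l).map (fun a b h => h)))
  rw [hfresh]
  simp only [Function.comp_def, List.map_map]
  rfl

lemma sorted_filter_comm (l : List Char) (q : Char → Bool) :
    PySem.List.sorted ((PySem.Set.ofList l).filter q) (fun c => c)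
      = (PySem.List.sorted (PySem.Set.ofList l) (fun c => c)).filter q := by
  apply PySem.List.sorted_eq_of_perm_of_pairwise_lt
  · exact (PySem.List.sorted_perm (PySem.Set.ofList l) (fun c => c) false).filter q
  · exact (PySem.List.sorted_ofList_pairwise_lt l).filter q

-- ===== VERDICT (by name: the statement is the Claim_ definition above) =====
theorem solve_spec : Claim_equal_solve := by
  intro st _ hpre
  have hl : st.toList ≠ [] := hpre
  show solve st = solve_alt st
  simp only [solve, solve_alt]
  by_cases h1 : st.toList.length = 1
  · -- len(st) == 1: A returns st, B returns st[0], the same one-character string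
    obtain ⟨c, hc⟩ := List.length_eq_one_iff.mp h1
    have hofc : PySem.Set.ofList [c] = [c] := rfl
    have hsc : PySem.List.sorted ([c] : List Char) (fun c => c) = [c] :=
      PySem.List.sorted_eq_self_of_pairwise _ _ (List.pairwise_singleton _ _)
    rw [if_pos h1, hc, hofc, hsc, if_pos rfl, pyGet?_zero]
    simp only [List.head?_cons]
    have hst : String.ofList st.toList = st := String.ofList_toList
    conv_lhs => rw [← hst, hc]
  · rw [if_neg h1]
    by_cases h2 : (PySem.Set.ofList st.toList).length = st.toList.length
    · -- all characters distinct: both return st[0]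
      rw [if_pos h2]
      have hb : (PySem.List.sorted (PySem.Set.ofList st.toList) (fun c => c)).length
          = st.toList.length := by rw [PySem.List.length_sorted]; exact h2
      rw [if_pos hb]
    · -- main case: both return the smallest character of maximal span
      rw [if_neg h2]
      have hb : ¬ (PySem.List.sorted (PySem.Set.ofList st.toList) (fun c => c)).length
          = st.toList.length := by rw [PySem.List.length_sorted]; exact h2
      rw [if_neg hb]
      have hitems := spans_items st.toList
      set l := st.toList with hls
      rw [hitems]
      obtain ⟨x0, hx0⟩ := List.exists_mem_of_ne_nil _ hl
      have hmapne : (PySem.Set.ofList l).map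
          (fun c => (c, PySem.List.pyGetD (occ l 0 c) (-1) 0 - PySem.List.pyGetD (occ l 0 c) 0 0))
          ≠ [] := by
        simp only [ne_eq, List.map_eq_nil_iff]
        intro he
        have := (PySem.Set.mem_ofList l x0).mpr hx0
        rw [he] at this
        cases this
      cases hmk : PySem.List.max?
          ((PySem.Set.ofList l).map
            (fun c => (c, PySem.List.pyGetD (occ l 0 c) (-1) 0 - PySem.List.pyGetD (occ l 0 c) 0 0)))
          (fun kv => kv.2) with
      | none => exact absurd ((PySem.List.max?_eq_none_iff _ _).mp hmk) hmapne
      | some mkv =>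
      dsimp only
      -- the maximum is attained at some character c0 of the set
      obtain ⟨c0, hc0S, hc0e⟩ := List.mem_map.mp (PySem.List.max?_mem hmk)
      have hc0l : c0 ∈ l := (PySem.Set.mem_ofList l c0).mp hc0S
      have hk0 : mkv.2 = spanAt l c0 := by
        rw [← hc0e]
        exact span_eq hc0l
      have hmaxS : ∀ c ∈ PySem.Set.ofList l, spanAt l c ≤ mkv.2 := by
        intro c hc
        have hy := PySem.List.max?_isMax hmk _ (List.mem_map_of_mem hc)
        have := span_eq ((PySem.Set.mem_ofList l c).mp hc)
        simp only at hy
        omega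
      set chars := PySem.List.sorted (PySem.Set.ofList l) (fun c => c) with hchars
      have hc0c : c0 ∈ chars := (PySem.List.mem_sorted _ _ _ _).mpr hc0S
      have h00 : (0:Int) ≤ spanAt l c0 := span_nonneg hc0l
      set M := chars.foldl (fun m c => max m (spanAt l c)) (-1) with hM
      have hMge : spanAt l c0 ≤ M := (PySem.List.le_foldl_max_int chars (spanAt l) (-1)).2 c0 hc0c
      have hMle : M ≤ mkv.2 := by
        have hmm : List.foldl max (-1) (chars.map (spanAt l)) = M := by
          rw [List.foldl_map]
        rcases PySem.List.foldl_max_mem (chars.map (spanAt l)) (-1) with he | hmem2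
        · rw [hmm] at he
          omega
        · rw [hmm] at hmem2
          obtain ⟨c1, hc1, he1⟩ := List.mem_map.mp hmem2
          have := hmaxS c1 ((PySem.List.mem_sorted _ _ _ _).mp hc1)
          omega
      have hMeq : M = mkv.2 := le_antisymm hMle (hk0 ▸ hMge)
      -- B's loop returns the first (= smallest) character attaining the maximal span
      have hbest := fold_best l chars ((none : Option Char), (-1 : Int))
        ⟨c0, hc0c, by show (-1:Int) < spanAt l c0; omega⟩
      rw [← hM, hMeq] at hbest
      rw [hbest]
      -- A's result list is the set filtered to maximal span
      have hres : List.foldl (fun r kv => if kv.2 == mkv.2 then r ++ [kv.1] else r) []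
            ((PySem.Set.ofList l).map
              (fun c => (c, PySem.List.pyGetD (occ l 0 c) (-1) 0 - PySem.List.pyGetD (occ l 0 c) 0 0)))
          = (PySem.Set.ofList l).filter (fun c => spanAt l c == mkv.2) := by
        rw [PySem.List.foldl_append_if (fun kv : Char × Int => kv.2 == mkv.2) (fun kv : Char × Int => kv.1),
          List.nil_append, List.filter_map, List.map_map]
        rw [List.filter_congr (fun c hc => by
          simp only [Function.comp_apply]
          rw [span_eq ((PySem.Set.mem_ofList l c).mp hc)])]
        simp [Function.comp_def]
      rw [hres, sorted_filter_comm l (fun c => spanAt l c == mkv.2), ← hchars, pyGet?_zero]
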